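-- pv_equiv track=rewrite | github.com/Strob0t/CodeForge | workers/codeforge/evaluation/runners/agent.py | _compute_files_changed
-- ===== SOURCE A (Python) =====
-- def _compute_files_changed(before: dict[str, str], after: dict[str, str]) -> list[str]:
--     """Compute list of files that were added, modified, or deleted."""
--     changed: list[str] = []
--     all_keys = set(before) | set(after)
--     for key in sorted(all_keys):
--         if key not in before:
--             changed.append(key)  # added
--         elif key not in after:
--             changed.append(key)  # deleted
--         elif before[key] != after[key]:
--             changed.append(key)  # modified
--     return changed
-- ===== SOURCE B (Python) =====
-- def _compute_files_changed(before: dict[str, str], after: dict[str, str]) -> list[str]: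
--     """Compute list of files that were added, modified, or deleted."""
--     bk = sorted(before)
--     ak = sorted(after)
--     out: list[str] = []
--     i = j = 0
--     while i < len(bk) and j < len(ak):
--         if bk[i] < ak[j]:
--             out.append(bk[i])   # deleted
--             i += 1
--         elif ak[j] < bk[i]:
--             out.append(ak[j])   # added
--             j += 1
--         else:
--             if before[bk[i]] != after[ak[j]]:
--                 out.append(bk[i])   # modified
--             i += 1
--             j += 1
--     out.extend(bk[i:])  # remaining deleted
--     out.extend(ak[j:])  # remaining added
--     return out
-- ===== Notes on version B (the rewrite author's own statement) =====
-- stated objective: alternative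
-- what changed: Replaces A's filtered pass over the sorted union of keys by a two-pointer merge of the two independently sorted key lists, emitting a key when it is missing from one side or its values differ; the output comes out sorted by the merge itself, with no union set built.
import Mathlib
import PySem

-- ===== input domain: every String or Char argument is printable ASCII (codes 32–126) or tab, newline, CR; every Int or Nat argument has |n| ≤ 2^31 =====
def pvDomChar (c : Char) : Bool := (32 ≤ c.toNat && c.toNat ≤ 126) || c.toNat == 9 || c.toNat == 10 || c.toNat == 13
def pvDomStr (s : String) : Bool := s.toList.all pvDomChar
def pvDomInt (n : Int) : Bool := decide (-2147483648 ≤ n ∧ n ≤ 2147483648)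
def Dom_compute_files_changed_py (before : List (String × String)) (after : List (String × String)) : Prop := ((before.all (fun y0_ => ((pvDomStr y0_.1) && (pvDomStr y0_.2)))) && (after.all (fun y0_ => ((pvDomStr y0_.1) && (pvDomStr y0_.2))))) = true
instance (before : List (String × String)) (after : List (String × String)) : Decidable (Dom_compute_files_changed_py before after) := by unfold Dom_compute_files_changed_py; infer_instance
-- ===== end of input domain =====

-- B replaces A's filtered pass over the sorted union of keys by a two-pointer merge of the two
-- independently sorted key lists (objective: alternative algorithm, same asymptotic cost).


-- ===== PORT A =====
def compute_files_changed_py (before : List (String × String)) (after : List (String × String)) : List String :=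
  let b := PySem.Dict.ofList before
  let a := PySem.Dict.ofList after
  let all_keys := PySem.Set.union (PySem.Set.ofList b.keys) (PySem.Set.ofList a.keys)
  (PySem.List.sorted all_keys (fun k => k) false).foldl
    (fun changed key =>
      if !(b.contains key) then changed ++ [key]          -- added
      else if !(a.contains key) then changed ++ [key]     -- deleted
      else if b.get? key ≠ a.get? key then changed ++ [key]  -- modified
      else changed) []

-- ===== PORT B =====
-- Source B's while loop over indices i, j into the two sorted key lists, transcribed as the
-- structural recursion over the two list suffixes; the trailing extends are the [],ys / xs,[] cases.
def pvMergeChanged (b a : PySem.Dict String String) : List String → List String → List String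
  | [], ys => ys
  | x :: xs, [] => x :: xs
  | x :: xs, y :: ys =>
    if x < y then x :: pvMergeChanged b a xs (y :: ys)        -- deleted
    else if y < x then y :: pvMergeChanged b a (x :: xs) ys   -- added
    else (if b.get? x ≠ a.get? y then [x] else []) ++ pvMergeChanged b a xs ys  -- modified?

def compute_files_changed_py_alt (before : List (String × String)) (after : List (String × String)) : List String :=
  let b := PySem.Dict.ofList before
  let a := PySem.Dict.ofList after
  let bk := PySem.List.sorted b.keys (fun k => k) false
  let ak := PySem.List.sorted a.keys (fun k => k) false
  pvMergeChanged b a bk ak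

-- ===== PRECONDITION & SPEC =====
def Spec_compute_files_changed_py (before : List (String × String)) (after : List (String × String)) (out : List String) : Prop := out = compute_files_changed_py_alt before after
instance (before : List (String × String)) (after : List (String × String)) (out : List String) : Decidable (Spec_compute_files_changed_py before after out) := by unfold Spec_compute_files_changed_py; infer_instance

-- ===== CLAIM (what is proved, stated in full; the proofs are below) =====
def Claim_equal_compute_files_changed_py : Prop := ∀ (before : List (String × String)) (after : List (String × String)), Dom_compute_files_changed_py before after → Spec_compute_files_changed_py before after (compute_files_changed_py before after)

-- ===== LEMMAS AND PROOFS =====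

-- A's loop body, as one if with a single Bool condition.
theorem pv_body_eq (b a : PySem.Dict String String) (changed : List String) (key : String) :
    (if !(b.contains key) then changed ++ [key]
     else if !(a.contains key) then changed ++ [key]
     else if b.get? key ≠ a.get? key then changed ++ [key]
     else changed)
    = (if (!(b.contains key) || !(a.contains key) || (b.get? key != a.get? key)) then changed ++ [key] else changed) := by
  by_cases hb : b.contains key <;> by_cases ha : a.contains key <;>
    by_cases hq : b.get? key = a.get? key <;> simp [hb, ha, hq]

-- every element of the merge comes from one of the two inputs
theorem pv_merge_subset (b a : PySem.Dict String String) (xs ys : List String) (z : String)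
    (h : z ∈ pvMergeChanged b a xs ys) : z ∈ xs ∨ z ∈ ys := by
  induction xs generalizing ys with
  | nil => exact Or.inr (by simpa [pvMergeChanged] using h)
  | cons x xs ih =>
    induction ys with
    | nil => exact Or.inl (by simpa [pvMergeChanged] using h)
    | cons y ys ihy =>
      simp only [pvMergeChanged] at h
      split_ifs at h with h1 h2 h3
      · rcases List.mem_cons.mp h with h | h
        · exact Or.inl (List.mem_cons.mpr (Or.inl h))
        · rcases ih _ h with h | h
          · exact Or.inl (List.mem_cons.mpr (Or.inr h))
          · exact Or.inr h
      · rcases List.mem_cons.mp h with h | h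
        · exact Or.inr (List.mem_cons.mpr (Or.inl h))
        · rcases ihy h with h | h
          · exact Or.inl h
          · exact Or.inr (List.mem_cons.mpr (Or.inr h))
      · rcases List.mem_append.mp h with h | h
        · exact Or.inl (List.mem_cons.mpr (Or.inl (by simpa using h)))
        · rcases ih _ h with h | h
          · exact Or.inl (List.mem_cons.mpr (Or.inr h))
          · exact Or.inr (List.mem_cons.mpr (Or.inr h))
      · rw [List.nil_append] at h
        rcases ih _ h with h | h
        · exact Or.inl (List.mem_cons.mpr (Or.inr h))
        · exact Or.inr (List.mem_cons.mpr (Or.inr h))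

-- the merge of strictly increasing lists is strictly increasing
theorem pv_merge_pairwise (b a : PySem.Dict String String) (xs ys : List String)
    (hxs : xs.Pairwise (· < ·)) (hys : ys.Pairwise (· < ·)) :
    (pvMergeChanged b a xs ys).Pairwise (· < ·) := by
  induction xs generalizing ys with
  | nil => simpa [pvMergeChanged] using hys
  | cons x xs ih =>
    induction ys with
    | nil => simpa [pvMergeChanged] using hxs
    | cons y ys ihy =>
      have hx := List.pairwise_cons.mp hxs
      have hy := List.pairwise_cons.mp hys
      simp only [pvMergeChanged]
      split_ifs with h1 h2 h3
      · refine List.pairwise_cons.mpr ⟨?_, ih (y :: ys) hx.2 hys⟩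
        intro z hz
        rcases pv_merge_subset b a xs (y :: ys) z hz with h | h
        · exact hx.1 z h
        · rcases List.mem_cons.mp h with rfl | h
          · exact h1
          · exact lt_trans h1 (hy.1 z h)
      · refine List.pairwise_cons.mpr ⟨?_, ihy hy.2⟩
        intro z hz
        rcases pv_merge_subset b a (x :: xs) ys z hz with h | h
        · rcases List.mem_cons.mp h with rfl | h
          · exact h2
          · exact lt_trans h2 (hx.1 z h)
        · exact hy.1 z h
      · have hxy : x = y := le_antisymm (not_lt.mp h2) (not_lt.mp h1)
        rw [List.singleton_append]
        refine List.pairwise_cons.mpr ⟨?_, ih ys hx.2 hy.2⟩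
        intro z hz
        rcases pv_merge_subset b a xs ys z hz with h | h
        · exact hx.1 z h
        · exact hxy ▸ hy.1 z h
      · rw [List.nil_append]
        exact ih ys hx.2 hy.2

-- membership in the merge of strictly increasing lists
theorem pv_merge_mem (b a : PySem.Dict String String) (xs ys : List String)
    (hxs : xs.Pairwise (· < ·)) (hys : ys.Pairwise (· < ·)) (z : String) :
    z ∈ pvMergeChanged b a xs ys ↔
      ((z ∈ xs ∧ z ∉ ys) ∨ (z ∉ xs ∧ z ∈ ys) ∨ (z ∈ xs ∧ z ∈ ys ∧ b.get? z ≠ a.get? z)) := by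
  induction xs generalizing ys with
  | nil => simp [pvMergeChanged]
  | cons x xs ih =>
    induction ys with
    | nil => simp [pvMergeChanged]
    | cons y ys ihy =>
      have hx := List.pairwise_cons.mp hxs
      have hy := List.pairwise_cons.mp hys
      have hxnxs : x ∉ xs := fun h => lt_irrefl x (hx.1 x h)
      have hynys : y ∉ ys := fun h => lt_irrefl y (hy.1 y h)
      simp only [pvMergeChanged]
      split_ifs with h1 h2 h3
      · -- x < y : x is not in y :: ys
        have hxny : x ∉ y :: ys := by
          intro h
          rcases List.mem_cons.mp h with rfl | h
          · exact lt_irrefl x h1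
          · exact lt_irrefl x (lt_trans h1 (hy.1 x h))
        rw [List.mem_cons, ih (y :: ys) hx.2 hys]
        by_cases hzx : z = x
        · subst hzx; simp [hxny, hxnxs]
        · simp only [List.mem_cons, hzx, false_or]
      · -- y < x : y is not in x :: xs
        have hynx : y ∉ x :: xs := by
          intro h
          rcases List.mem_cons.mp h with rfl | h
          · exact lt_irrefl y h2
          · exact lt_irrefl y (lt_trans h2 (hx.1 y h))
        rw [List.mem_cons, ihy hy.2]
        by_cases hzy : z = y
        · subst hzy; simp [hynx, hynys]
        · simp only [List.mem_cons, hzy, false_or]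
      · -- x = y, values differ
        have hxy : x = y := le_antisymm (not_lt.mp h2) (not_lt.mp h1)
        subst hxy
        rw [List.singleton_append, List.mem_cons, ih ys hx.2 hy.2]
        by_cases hzx : z = x
        · subst hzx; simp [hxnxs, hynys, h3]
        · simp only [List.mem_cons, hzx, false_or]
      · -- x = y, values equal
        have hxy : x = y := le_antisymm (not_lt.mp h2) (not_lt.mp h1)
        subst hxy
        push Not at h3
        rw [List.nil_append, ih ys hx.2 hy.2]
        by_cases hzx : z = x
        · subst hzx; simp [hxnxs, hynys, h3]
        · simp only [List.mem_cons, hzx, false_or]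

theorem pv_main (before after : List (String × String)) :
    compute_files_changed_py before after = compute_files_changed_py_alt before after := by
  unfold compute_files_changed_py compute_files_changed_py_alt
  set b := PySem.Dict.ofList before with hb
  set a := PySem.Dict.ofList after with ha
  set p : String → Bool := fun key => (!(b.contains key) || !(a.contains key) || (b.get? key != a.get? key)) with hp
  set u : PySem.Set String := PySem.Set.union (PySem.Set.ofList b.keys) (PySem.Set.ofList a.keys) with hu
  set bk : List String := PySem.List.sorted b.keys (fun k => k) false with hbk
  set ak : List String := PySem.List.sorted a.keys (fun k => k) false with hak
  -- A's fold is a filter of the sorted union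
  have hcongr : (PySem.List.sorted u (fun k => k) false).foldl
      (fun changed key =>
        if !(b.contains key) then changed ++ [key]
        else if !(a.contains key) then changed ++ [key]
        else if b.get? key ≠ a.get? key then changed ++ [key]
        else changed) []
      = (PySem.List.sorted u (fun k => k) false).foldl
        (fun changed key => if p key then changed ++ [key] else changed) [] := by
    refine PySem.List.foldl_congr_mem _ _ _ _ ?_
    intro acc x _
    exact pv_body_eq b a acc x
  rw [hcongr, PySem.List.foldl_append_if_eq_filter, List.nil_append]
  -- strict sortedness of both sides
  have hbnd : b.keys.Nodup := PySem.Dict.nodup_keys_ofList before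
  have hand : a.keys.Nodup := PySem.Dict.nodup_keys_ofList after
  have hbk_lt : bk.Pairwise (· < ·) := by
    have hle : bk.Pairwise (· ≤ ·) := PySem.List.sorted_pairwise b.keys (fun k => k)
    have hnd : bk.Nodup := ((PySem.List.sorted_perm b.keys (fun k => k) false).nodup_iff).mpr hbnd
    exact (hle.and hnd).imp (fun h => lt_of_le_of_ne h.1 h.2)
  have hak_lt : ak.Pairwise (· < ·) := by
    have hle : ak.Pairwise (· ≤ ·) := PySem.List.sorted_pairwise a.keys (fun k => k)
    have hnd : ak.Nodup := ((PySem.List.sorted_perm a.keys (fun k => k) false).nodup_iff).mpr hand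
    exact (hle.and hnd).imp (fun h => lt_of_le_of_ne h.1 h.2)
  have hund : u.Nodup := PySem.Set.nodup_union _ _ (PySem.Set.nodup_ofList _)
  have hsnd : (PySem.List.sorted u (fun k => k) false).Nodup :=
    ((PySem.List.sorted_perm u (fun k => k) false).nodup_iff).mpr hund
  have hplt : (PySem.List.sorted u (fun k => k) false).Pairwise (· < ·) :=
    ((PySem.List.sorted_pairwise u (fun k => k)).and hsnd).imp (fun h => lt_of_le_of_ne h.1 h.2)
  have hflt : ((PySem.List.sorted u (fun k => k) false).filter p).Pairwise (· < ·) := hplt.filter p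
  have hmlt : (pvMergeChanged b a bk ak).Pairwise (· < ·) := pv_merge_pairwise b a bk ak hbk_lt hak_lt
  -- same membership
  have hmem : ∀ z, z ∈ (PySem.List.sorted u (fun k => k) false).filter p ↔ z ∈ pvMergeChanged b a bk ak := by
    intro z
    have hzb : z ∈ bk ↔ b.contains z = true := by
      rw [hbk, PySem.List.mem_sorted]; exact (PySem.Dict.contains_iff_mem_keys b z).symm
    have hza : z ∈ ak ↔ a.contains z = true := by
      rw [hak, PySem.List.mem_sorted]; exact (PySem.Dict.contains_iff_mem_keys a z).symm
    rw [pv_merge_mem b a bk ak hbk_lt hak_lt z, List.mem_filter, PySem.List.mem_sorted, hu,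
      PySem.Set.mem_union, PySem.Set.mem_ofList, PySem.Set.mem_ofList,
      ← PySem.Dict.contains_iff_mem_keys, ← PySem.Dict.contains_iff_mem_keys, hzb, hza, hp]
    by_cases h1 : b.contains z <;> by_cases h2 : a.contains z <;>
      by_cases hq : b.get? z = a.get? z <;> simp [h1, h2, hq]
  have hfnd : ((PySem.List.sorted u (fun k => k) false).filter p).Nodup := hsnd.filter p
  have hmnd : (pvMergeChanged b a bk ak).Nodup := hmlt.imp (fun h => ne_of_lt h)
  have hperm : (pvMergeChanged b a bk ak).Perm ((PySem.List.sorted u (fun k => k) false).filter p) :=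
    (List.perm_ext_iff_of_nodup hmnd hfnd).mpr (fun z => (hmem z).symm)
  have e1 : PySem.List.sorted ((PySem.List.sorted u (fun k => k) false).filter p) (fun k => k) false
      = (PySem.List.sorted u (fun k => k) false).filter p :=
    PySem.List.sorted_eq_of_perm_of_pairwise_lt _ _ _ (List.Perm.refl _) hflt
  have e2 : PySem.List.sorted ((PySem.List.sorted u (fun k => k) false).filter p) (fun k => k) false
      = pvMergeChanged b a bk ak :=
    PySem.List.sorted_eq_of_perm_of_pairwise_lt _ _ _ hperm hmlt
  rw [← e1, e2]

-- ===== VERDICT (by name: the statement is the Claim_ definition above) =====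
theorem compute_files_changed_py_spec : Claim_equal_compute_files_changed_py := by
  intro before after _
  unfold Spec_compute_files_changed_py
  exact pv_main before after
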